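-- pv_equiv track=rewrite | github.com/maciejczyzewski/fast_gpu_voronoi | test.py | step_function_default
-- ===== SOURCE A (Python) =====
-- import math
--
-- oo = 1111111111111
--
-- def step_function_default(shape, num=None, config=None):
--     steps = []
--     for factor in range(1, +oo, 1):
--         f = math.ceil(max(shape) / (2**(factor)))
--         steps.append(f)
--         if f <= 1:
--             break
--     return steps
-- ===== SOURCE B (Python) =====
-- def step_function_default(shape, num=None, config=None):
--     # B: maintain a running value and halve it (ceil) each step, instead of
--     # recomputing ceil(max(shape)/2**factor) with a fresh power every iteration.
--     f = -(-max(shape) // 2)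
--     steps = [f]
--     while f > 1:
--         f = -(-f // 2)
--         steps.append(f)
--     return steps
-- ===== Notes on version B (the rewrite author's own statement) =====
-- stated objective: simpler
-- what changed: B keeps a running value and repeatedly ceil-halves it with integer arithmetic (ceil(ceil(x/2)/2)=ceil(x/4)), instead of A's loop over an unbounded range recomputing ceil(max(shape)/2**factor) with a fresh power and float division each step.
import Mathlib
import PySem

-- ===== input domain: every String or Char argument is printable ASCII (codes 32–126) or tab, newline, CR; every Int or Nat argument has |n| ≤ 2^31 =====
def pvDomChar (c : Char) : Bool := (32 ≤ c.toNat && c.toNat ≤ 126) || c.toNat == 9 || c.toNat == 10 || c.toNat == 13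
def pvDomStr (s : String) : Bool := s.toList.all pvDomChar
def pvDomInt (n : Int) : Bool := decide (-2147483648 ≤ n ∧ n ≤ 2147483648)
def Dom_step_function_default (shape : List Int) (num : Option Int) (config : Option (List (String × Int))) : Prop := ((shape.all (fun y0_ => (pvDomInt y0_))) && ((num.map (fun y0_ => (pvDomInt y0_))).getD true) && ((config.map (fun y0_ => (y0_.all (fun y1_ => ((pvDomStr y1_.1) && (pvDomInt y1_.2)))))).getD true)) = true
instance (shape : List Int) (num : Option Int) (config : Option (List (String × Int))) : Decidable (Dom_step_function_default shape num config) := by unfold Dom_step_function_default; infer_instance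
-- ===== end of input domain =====

-- B replaces A's range loop with fresh powers 2**factor by a running ceil-halved value (simpler); return values agree on every non-empty shape.

-- ===== PORT A =====
-- math.ceil(m / 2**factor) on the |int| ≤ 2^31 domain is exact in float and equals
-- integer ceiling division, ported as -((-m) // 2**factor).
def pvCeilDiv (a d : Int) : Int := -(PySem.Int.floordiv (-a) d)

-- the for-loop over range(1, oo, 1) with break, as fuel recursion over the remaining range
def pvALoop (m : Int) (steps : List Int) (fuel : Nat) (factor : Nat) : List Int :=
  match fuel with
  | 0 => steps
  | fuel + 1 =>
    let f := pvCeilDiv m (2 ^ factor)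
    let steps := steps ++ [f]
    if f ≤ 1 then steps else pvALoop m steps fuel (factor + 1)

def step_function_default (shape : List Int) (num : Option Int) (config : Option (List (String × Int))) : List Int :=
  match PySem.List.max? shape (fun y => y) with
  | none => []  -- max([]) raises ValueError in Python; excluded by Pre_
  | some m => pvALoop m [] 1111111111110 1  -- range(1, oo, 1) has oo-1 items

-- ===== PORT B =====
-- termination: ceil-halving strictly decreases a value > 1
theorem pvCeilDiv_two_lt (f : Int) (h : 1 < f) : (pvCeilDiv f 2).toNat < f.toNat := by
  have h2 : PySem.Int.floordiv (-f) 2 = (-f) / 2 :=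
    PySem.Int.floordiv_eq_ediv_of_pos (by omega)
  simp only [pvCeilDiv, h2]
  omega

-- while f > 1: f = -(-f // 2); steps.append(f)  — the appended tail, built front-to-back
def pvBLoop (f : Int) : List Int :=
  if h : 1 < f then
    let f' := pvCeilDiv f 2
    f' :: pvBLoop f'
  else []
termination_by f.toNat
decreasing_by exact pvCeilDiv_two_lt f h

def step_function_default_alt (shape : List Int) (num : Option Int) (config : Option (List (String × Int))) : List Int :=
  match PySem.List.max? shape (fun y => y) with
  | none => []  -- max([]) raises ValueError in Python; excluded by Pre_
  | some m =>
    let f := pvCeilDiv m 2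
    f :: pvBLoop f

-- ===== PRECONDITION & SPEC =====
-- A raises ValueError on max([]) when shape is empty; exactly those inputs are excluded.
def Pre_step_function_default (shape : List Int) (num : Option Int) (config : Option (List (String × Int))) : Prop := shape ≠ []
instance (shape : List Int) (num : Option Int) (config : Option (List (String × Int))) : Decidable (Pre_step_function_default shape num config) := by unfold Pre_step_function_default; infer_instance
def pvWitness_step_function_default : List Int × Option Int × (Option (List (String × Int))) := ([5, 2], none, none)

def Spec_step_function_default (shape : List Int) (num : Option Int) (config : Option (List (String × Int))) (out : List Int) : Prop := out = step_function_default_alt shape num config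
instance (shape : List Int) (num : Option Int) (config : Option (List (String × Int))) (out : List Int) : Decidable (Spec_step_function_default shape num config out) := by unfold Spec_step_function_default; infer_instance

-- ===== CLAIM (what is proved, stated in full; the proofs are below) =====
def Claim_equal_step_function_default : Prop := ∀ (shape : List Int) (num : Option Int) (config : Option (List (String × Int))), Dom_step_function_default shape num config → Pre_step_function_default shape num config → Spec_step_function_default shape num config (step_function_default shape num config)

-- ===== LEMMAS AND PROOFS =====

-- ceiling division is at most 1 exactly when the numerator is at most the (positive) divisor
theorem pvCeilDiv_le_one_iff (m d : Int) (hd : 0 < d) : pvCeilDiv m d ≤ 1 ↔ m ≤ d := by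
  unfold pvCeilDiv
  rw [PySem.Int.floordiv_eq_ediv_of_pos hd]
  have h := Int.le_ediv_iff_mul_le (a := (-1 : Int)) (b := -m) hd
  constructor
  · intro h1
    have h2 : (-1 : Int) * d ≤ -m := h.mp (by linarith)
    linarith
  · intro h1
    have h2 : (-1 : Int) ≤ (-m) / d := h.mpr (by linarith)
    linarith

-- nested ceil-halving: ceil(ceil(m / d) / 2) = ceil(m / (2d)) for d > 0
theorem pvCeilDiv_compose (m d : Int) (hd : 0 < d) :
    pvCeilDiv (pvCeilDiv m d) 2 = pvCeilDiv m (d * 2) := by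
  unfold pvCeilDiv
  rw [neg_neg,
    PySem.Int.floordiv_eq_ediv_of_pos (show (0:Int) < 2 by omega),
    PySem.Int.floordiv_eq_ediv_of_pos hd,
    PySem.Int.floordiv_eq_ediv_of_pos (show (0:Int) < d * 2 by positivity),
    Int.ediv_ediv_of_nonneg (le_of_lt hd)]

-- the A-loop, given enough fuel, produces the current term followed by B's tail
theorem pvALoop_eq (fuel : Nat) (m : Int) (factor : Nat) (acc : List Int)
    (hm : m ≤ 2 ^ factor * 2 ^ fuel) :
    pvALoop m acc (fuel + 1) factor =
      acc ++ pvCeilDiv m (2 ^ factor) :: pvBLoop (pvCeilDiv m (2 ^ factor)) := by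
  induction fuel generalizing factor acc with
  | zero =>
    have hle : pvCeilDiv m (2 ^ factor) ≤ 1 :=
      (pvCeilDiv_le_one_iff m (2 ^ factor) (by positivity)).mpr (by simpa using hm)
    rw [pvALoop, pvBLoop]
    simp [hle, not_lt.mpr hle]
  | succ fuel ih =>
    rw [pvALoop]
    by_cases hle : pvCeilDiv m (2 ^ factor) ≤ 1
    · rw [pvBLoop]
      simp [hle, not_lt.mpr hle]
    · have hrec := ih (factor + 1) (acc ++ [pvCeilDiv m (2 ^ factor)])
        (by rw [pow_succ]; rw [pow_succ'] at hm; linarith [hm])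
      rw [pvBLoop]
      simp only [hle, lt_iff_not_ge]
      have hid : pvCeilDiv (pvCeilDiv m (2 ^ factor)) 2 = pvCeilDiv m (2 ^ (factor + 1)) := by
        rw [pvCeilDiv_compose m (2 ^ factor) (by positivity), pow_succ]
      simp only [ite_false]
      rw [hrec, hid]
      simp

-- the maximum of a Dom-bounded list is at most 2^31
theorem pvMax_bound (shape : List Int) (m : Int)
    (hd : shape.all (fun y => pvDomInt y) = true)
    (hm : PySem.List.max? shape (fun y => y) = some m) : m ≤ 2 ^ 31 := by
  have hmem : m ∈ shape := PySem.List.max?_mem hm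
  have := (List.all_eq_true.mp hd) m hmem
  simp only [pvDomInt, decide_eq_true_eq] at this
  omega

-- ===== VERDICT (by name: the statement is the Claim_ definition above) =====
theorem step_function_default_spec : Claim_equal_step_function_default := by
  intro shape num config hdom _hpre
  unfold Spec_step_function_default step_function_default step_function_default_alt
  cases hmx : PySem.List.max? shape (fun y => y) with
  | none => rfl
  | some m =>
    have hd : shape.all (fun y => pvDomInt y) = true := by
      unfold Dom_step_function_default at hdom
      simp only [Bool.and_eq_true] at hdom
      exact hdom.1.1
    have hm31 : m ≤ 2 ^ 31 := pvMax_bound shape m hd hmx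
    have hm : m ≤ 2 ^ 1 * 2 ^ 1111111111109 := by
      calc m ≤ 2 ^ 31 := hm31
        _ ≤ 2 ^ 1 * 2 ^ 1111111111109 := by
          rw [← pow_add]
          exact pow_le_pow_right₀ (by omega) (by omega)
    have := pvALoop_eq 1111111111109 m 1 [] hm
    simpa [pow_one] using this
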